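-- pv_equiv track=rewrite | github.com/digitivity-Gokul-Krishnan-Y-N/voice_rx | src/extraction.py | _extract_complaints
-- ===== SOURCE A (Python) =====
-- from typing import Dict, List, Optional
--
-- def _extract_complaints(text: str) -> List[str]:
--     """Extract complaints with priority ordering."""
--     text_lower = text.lower()
--     complaints = []
--     found = {}
--
--     checks = [
--         ('difficulty breathing', 'difficulty breathing', 1),
--         ('difficulty swallowing', 'difficulty swallowing', 1),
--         ('throat pain', 'throat pain', 2),
--         ('fever', 'fever', 2),
--         ('cough', 'cough', 2),
--         ('infection', 'infection', 3),
--         ('pain', 'pain', 4),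
--     ]
--
--     for keyword, label, priority in checks:
--         if keyword in text_lower and label not in found:
--             found[label] = priority
--
--     return sorted(found.keys(), key=lambda x: found[x])[:5]
-- ===== SOURCE B (Python) =====
-- from typing import List
--
-- _KEYWORDS = [
--     'difficulty breathing',
--     'difficulty swallowing',
--     'throat pain',
--     'fever',
--     'cough',
--     'infection',
--     'pain',
-- ]
--
-- def _extract_complaints(text: str) -> List[str]:
--     """Extract complaints: the checks list is already in priority order and
--     labels are distinct, so one filtering pass replaces the dict and the sort."""
--     text_lower = text.lower()
--     return [kw for kw in _KEYWORDS if kw in text_lower][:5]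
-- ===== Notes on version B (the rewrite author's own statement) =====
-- stated objective: simpler
-- what changed: B drops A's found-dict and final stable sort: since A's checks list is already in non-decreasing priority order with distinct labels, a single filtering pass over the keyword list followed by [:5] returns the same list.
import Mathlib
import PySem

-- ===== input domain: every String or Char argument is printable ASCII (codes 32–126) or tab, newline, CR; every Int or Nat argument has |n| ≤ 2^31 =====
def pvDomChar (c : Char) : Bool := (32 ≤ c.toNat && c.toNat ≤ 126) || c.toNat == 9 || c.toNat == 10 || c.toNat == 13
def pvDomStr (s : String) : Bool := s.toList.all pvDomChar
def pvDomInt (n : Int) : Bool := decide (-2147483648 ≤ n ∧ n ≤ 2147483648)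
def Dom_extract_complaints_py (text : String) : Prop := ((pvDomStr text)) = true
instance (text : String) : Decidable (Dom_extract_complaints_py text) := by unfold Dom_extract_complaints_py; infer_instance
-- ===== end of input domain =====

-- B drops A's found-dict and final stable sort (the checks are already in priority
-- order with distinct labels); objective: simpler. Equivalence proved on all inputs.

-- ===== PORT A =====
def pvChecks : List (String × String × Int) :=
  [("difficulty breathing", "difficulty breathing", 1),
   ("difficulty swallowing", "difficulty swallowing", 1),
   ("throat pain", "throat pain", 2),
   ("fever", "fever", 2),
   ("cough", "cough", 2),
   ("infection", "infection", 3),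
   ("pain", "pain", 4)]

def extract_complaints_py (text : String) : List String :=
  let text_lower := PySem.Str.lower text
  let found : PySem.Dict String Int :=
    pvChecks.foldl
      (fun found c =>
        if PySem.Str.isIn c.1 text_lower && !(found.contains c.2.1) then
          found.insert c.2.1 c.2.2
        else found)
      PySem.Dict.empty
  (PySem.List.sorted found.keys (fun x => found.getD x 0) false).take 5

-- ===== PORT B =====
def pvKeywords : List String :=
  ["difficulty breathing", "difficulty swallowing", "throat pain", "fever",
   "cough", "infection", "pain"]

def extract_complaints_py_alt (text : String) : List String :=
  let text_lower := PySem.Str.lower text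
  (pvKeywords.filter (fun kw => PySem.Str.isIn kw text_lower)).take 5

-- ===== PRECONDITION & SPEC =====
def Spec_extract_complaints_py (text : String) (out : List String) : Prop := out = extract_complaints_py_alt text
instance (text : String) (out : List String) : Decidable (Spec_extract_complaints_py text out) := by unfold Spec_extract_complaints_py; infer_instance

-- ===== CLAIM (what is proved, stated in full; the proofs are below) =====
def Claim_equal_extract_complaints_py : Prop := ∀ (text : String), Dom_extract_complaints_py text → Spec_extract_complaints_py text (extract_complaints_py text)

-- ===== LEMMAS AND PROOFS =====

-- Both programs depend on the input only through the seven substring tests, so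
-- a case split on those booleans makes both sides closed and `decide` finishes.
theorem extract_complaints_core (t : String)
    (b1 b2 b3 b4 b5 b6 b7 : Bool)
    (h1 : PySem.Str.isIn "difficulty breathing" t = b1)
    (h2 : PySem.Str.isIn "difficulty swallowing" t = b2)
    (h3 : PySem.Str.isIn "throat pain" t = b3)
    (h4 : PySem.Str.isIn "fever" t = b4)
    (h5 : PySem.Str.isIn "cough" t = b5)
    (h6 : PySem.Str.isIn "infection" t = b6)
    (h7 : PySem.Str.isIn "pain" t = b7) :
    (PySem.List.sorted
        (pvChecks.foldl
          (fun (found : PySem.Dict String Int) c =>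
            if PySem.Str.isIn c.1 t && !(found.contains c.2.1) then
              found.insert c.2.1 c.2.2
            else found)
          PySem.Dict.empty).keys
        (fun x =>
          (pvChecks.foldl
            (fun (found : PySem.Dict String Int) c =>
              if PySem.Str.isIn c.1 t && !(found.contains c.2.1) then
                found.insert c.2.1 c.2.2
              else found)
            PySem.Dict.empty).getD x 0) false).take 5
    = (pvKeywords.filter (fun kw => PySem.Str.isIn kw t)).take 5 := by
  simp only [pvChecks, pvKeywords, List.foldl, List.filter, h1, h2, h3, h4, h5, h6, h7]
  clear h1 h2 h3 h4 h5 h6 h7 t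
  revert b1 b2 b3 b4 b5 b6 b7
  decide

-- ===== VERDICT (by name: the statement is the Claim_ definition above) =====
theorem extract_complaints_py_spec : Claim_equal_extract_complaints_py := by
  intro text _
  unfold Spec_extract_complaints_py extract_complaints_py extract_complaints_py_alt
  exact extract_complaints_core (PySem.Str.lower text) _ _ _ _ _ _ _ rfl rfl rfl rfl rfl rfl rfl
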